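-- pv_equiv track=rewrite | github.com/TheeWebMaster/midication | modules/historique/create_history_files.py | count
-- ===== SOURCE A (Python) =====
-- def count(ord_files):
--   temp = ord_files.copy()
--   mapping = {}
--
--   for i in range(len(temp)):
--     temp[i] = temp[i][:-6]
--
--   for patient in temp:
--     if patient not in mapping.keys():
--       mapping[patient] = temp.count(patient)
--
--   return mapping
-- ===== SOURCE B (Python) =====
-- def count(ord_files):
--   mapping = {}
--   for f in ord_files:
--     key = f[:-6]
--     mapping[key] = mapping.get(key, 0) + 1
--   return mapping
-- ===== Notes on version B (the rewrite author's own statement) =====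
-- stated objective: faster
-- what changed: Replaces A's copy-then-truncate pass plus a per-key full-list .count rescan with a single pass that increments a running counter per truncated key in one dict.
import Mathlib
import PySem

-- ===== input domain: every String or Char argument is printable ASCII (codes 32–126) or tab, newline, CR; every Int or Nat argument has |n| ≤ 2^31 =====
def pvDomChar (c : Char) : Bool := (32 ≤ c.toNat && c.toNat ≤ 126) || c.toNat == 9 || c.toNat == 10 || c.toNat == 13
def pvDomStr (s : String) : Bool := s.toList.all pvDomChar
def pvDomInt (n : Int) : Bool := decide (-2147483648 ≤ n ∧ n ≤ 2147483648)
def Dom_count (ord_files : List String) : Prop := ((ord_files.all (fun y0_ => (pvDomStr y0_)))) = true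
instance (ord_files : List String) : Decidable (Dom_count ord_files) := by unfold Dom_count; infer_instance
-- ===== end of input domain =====

-- B replaces A's per-key full-list .count rescan by a single counting pass over the truncated names (same result, one pass).


-- ===== PORT A =====
-- helper shared by both ports: f[:-6]
def pyTrunc (s : String) : String := PySem.Str.slice s none (some (-6))

-- temp[i] = temp[i][:-6] applied to every index of the copy; then for each patient,
-- if not yet a key, mapping[patient] = temp.count(patient).
def count (ord_files : List String) : List (String × Int) :=
  let temp := ord_files.map pyTrunc
  (temp.foldl
    (fun mapping patient =>
      if mapping.contains patient then mapping
      else mapping.insert patient ((temp.count patient : Int)))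
    PySem.Dict.empty).items

-- ===== PORT B =====
-- one pass: mapping[key] = mapping.get(key, 0) + 1 for key = f[:-6]
def count_alt (ord_files : List String) : List (String × Int) :=
  (ord_files.foldl
    (fun mapping f =>
      mapping.insert (pyTrunc f) (mapping.getD (pyTrunc f) 0 + 1))
    PySem.Dict.empty).items

-- ===== PRECONDITION & SPEC =====
def Spec_count (ord_files : List String) (out : List (String × Int)) : Prop := out = count_alt ord_files
instance (ord_files : List String) (out : List (String × Int)) : Decidable (Spec_count ord_files out) := by unfold Spec_count; infer_instance

-- ===== CLAIM (what is proved, stated in full; the proofs are below) =====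
def Claim_equal_count : Prop := ∀ (ord_files : List String), Dom_count ord_files → Spec_count ord_files (count ord_files)

-- ===== LEMMAS AND PROOFS =====

-- A's loop never overwrites: its lookup at k is the first value inserted for k (v of the full list), else none.
theorem countA_get? (v : String → Int) (l : List String) (d : PySem.Dict String Int) (k : String) :
    (l.foldl (fun m p => if m.contains p then m else m.insert p (v p)) d).get? k =
      if d.contains k then d.get? k else if k ∈ l then some (v k) else none := by
  induction l generalizing d with
  | nil =>
    simp only [List.foldl_nil, List.not_mem_nil, if_false]
    by_cases h : d.contains k
    · simp [h]
    · rw [if_neg h]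
      exact (PySem.Dict.get?_eq_none_iff_contains _ _).mpr (by simpa using h)
  | cons x l ih =>
    simp only [List.foldl_cons]
    by_cases hx : d.contains x
    · rw [if_pos hx, ih]
      by_cases hk : d.contains k
      · simp [hk]
      · have hkx : k ≠ x := fun h => hk (h ▸ hx)
        simp [hk, hkx]
    · rw [if_neg hx, ih, PySem.Dict.contains_insert]
      by_cases hkx : k = x
      · subst hkx
        simp [PySem.Dict.get?_insert_self, hx]
      · rw [PySem.Dict.get?_insert_of_ne _ _ hkx]
        simp [hkx, beq_iff_eq]

-- keys of A's loop: first occurrences, i.e. Set.update of the starting keys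
theorem countA_keys (v : String → Int) (l : List String) (d : PySem.Dict String Int) :
    (l.foldl (fun m p => if m.contains p then m else m.insert p (v p)) d).keys =
      PySem.Set.update d.keys l := by
  induction l generalizing d with
  | nil => rfl
  | cons x l ih =>
    simp only [List.foldl_cons, PySem.Set.update]
    by_cases hx : d.contains x
    · rw [if_pos hx, ih]
      have hadd : PySem.Set.add d.keys x = d.keys := by
        have hmem : x ∈ d.keys := (PySem.Dict.contains_iff_mem_keys _ _).mp hx
        simp [PySem.Set.add, hmem]
      rw [hadd]; rfl
    · rw [if_neg hx, ih, PySem.Dict.keys_insert_of_not_contains _ _ (by simpa using hx)]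
      have hmem : x ∉ d.keys := fun h => hx ((PySem.Dict.contains_iff_mem_keys _ _).mpr h)
      have hadd : PySem.Set.add d.keys x = d.keys ++ [x] := by
        simp [PySem.Set.add, hmem]
      rw [hadd]; rfl

-- B's fold over ord_files is the counter fold over the truncated list
theorem foldB_map (l : List String) (d : PySem.Dict String Int) :
    l.foldl (fun m f => m.insert (pyTrunc f) (m.getD (pyTrunc f) 0 + 1)) d
      = (l.map pyTrunc).foldl (fun m k => m.insert k (m.getD k 0 + 1)) d := by
  induction l generalizing d with
  | nil => rfl
  | cons x l ih => simp [ih]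

theorem count_eq_alt (ord_files : List String) : count ord_files = count_alt ord_files := by
  simp only [count, count_alt]
  rw [foldB_map, PySem.Dict.foldl_insert_getD_add_one_eq_counter, PySem.Dict.items_counter]
  set temp := ord_files.map pyTrunc with htemp
  have hkeys : (temp.foldl
      (fun m p => if m.contains p then m else m.insert p ((temp.count p : Int)))
      PySem.Dict.empty).keys = PySem.Set.ofList temp := by
    rw [countA_keys]
    simp [PySem.Set.update, PySem.Set.ofList, PySem.Dict.keys_empty]
  have hnd : (temp.foldl
      (fun m p => if m.contains p then m else m.insert p ((temp.count p : Int)))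
      PySem.Dict.empty).keys.Nodup := by
    rw [hkeys]; exact PySem.Set.nodup_ofList temp
  rw [PySem.Dict.items_eq_map_keys _ hnd 0, hkeys]
  apply List.map_congr_left
  intro k hk
  have hkmem : k ∈ temp := (PySem.Set.mem_ofList temp k).mp hk
  rw [PySem.Dict.getD_eq_get?_getD, countA_get? (fun p => (temp.count p : Int)) temp PySem.Dict.empty k]
  simp [PySem.Dict.contains_empty, hkmem]

-- ===== VERDICT (by name: the statement is the Claim_ definition above) =====
theorem count_spec : Claim_equal_count := by
  intro ord_files _
  unfold Spec_count
  exact count_eq_alt ord_files
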